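-- pv_equiv track=rewrite | github.com/mayank64ce/1901EE72_2021 | tut02/tut02.py | get_memory_score
-- ===== SOURCE A (Python) =====
-- def get_memory_score(a):
--     """This method returns the score of the memory game as describe by the rules in Problem Statement.
--
--     Args:
--         a (list): list of non-negative integers
--
--     Returns:
--         int: final score of the memory game
--     """
--     score = 0
--     in_memory = []
--     for x in a:
--         if x in in_memory:
--             score += 1
--         if len(in_memory) == 5:
--             del in_memory[0]
--         in_memory.append(x)
--     return score
-- ===== SOURCE B (Python) =====
-- def get_memory_score(a):
--     score = 0
--     last = {}
--     for i, x in enumerate(a):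
--         if x in last and i - last[x] <= 5:
--             score += 1
--         last[x] = i
--     return score
-- ===== Notes on version B (the rewrite author's own statement) =====
-- stated objective: alternative
-- what changed: B replaces A's rolling 5-element buffer and its per-step membership scan by a last-seen-index dictionary: an element scores iff its value was seen before at an index within distance 5.
import Mathlib
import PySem

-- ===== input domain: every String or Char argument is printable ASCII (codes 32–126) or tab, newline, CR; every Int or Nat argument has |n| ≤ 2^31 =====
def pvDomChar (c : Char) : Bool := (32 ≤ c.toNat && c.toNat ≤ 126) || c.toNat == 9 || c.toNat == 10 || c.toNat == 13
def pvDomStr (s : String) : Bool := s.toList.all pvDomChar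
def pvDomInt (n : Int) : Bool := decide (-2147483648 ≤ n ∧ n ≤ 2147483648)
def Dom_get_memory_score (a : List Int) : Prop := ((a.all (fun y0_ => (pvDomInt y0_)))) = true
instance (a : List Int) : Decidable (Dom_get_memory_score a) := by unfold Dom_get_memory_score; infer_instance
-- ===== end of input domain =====

-- B replaces A's rolling 5-element buffer by a last-seen-index dictionary:
-- an element scores iff its value occurred before within index distance 5.

-- ===== PORT A =====
-- loop body of A: membership test in the buffer, trim to 5, append
def pvStepA (st : Int × List Int) (x : Int) : Int × List Int :=
  let score := if x ∈ st.2 then st.1 + 1 else st.1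
  let mem := if st.2.length = 5 then st.2.drop 1 else st.2
  (score, mem ++ [x])

def get_memory_score (a : List Int) : Int :=
  (a.foldl pvStepA (0, [])).1

-- ===== PORT B =====
-- loop body of B: 'if x in last and i - last[x] <= 5: score += 1; last[x] = i'
def pvStepB (st : Int × PySem.Dict Int Int) (p : Int × Int) : Int × PySem.Dict Int Int :=
  let score :=
    match st.2.get? p.2 with
    | some j => if p.1 - j ≤ 5 then st.1 + 1 else st.1
    | none => st.1
  (score, st.2.insert p.2 p.1)

def get_memory_score_alt (a : List Int) : Int :=
  ((PySem.List.enumerate a).foldl pvStepB (0, PySem.Dict.empty)).1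

-- ===== PRECONDITION & SPEC =====
def Spec_get_memory_score (a : List Int) (out : Int) : Prop := out = get_memory_score_alt a
instance (a : List Int) (out : Int) : Decidable (Spec_get_memory_score a out) := by unfold Spec_get_memory_score; infer_instance

-- ===== CLAIM (what is proved, stated in full; the proofs are below) =====
def Claim_equal_get_memory_score : Prop := ∀ (a : List Int), Dom_get_memory_score a → Spec_get_memory_score a (get_memory_score a)

-- ===== LEMMAS AND PROOFS =====

-- index of the LAST occurrence of x in l
def pvLastOcc : List Int → Int → Option Nat
  | [], _ => none
  | y :: t, x =>
    match pvLastOcc t x with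
    | some j => some (j + 1)
    | none => if y = x then some 0 else none

theorem pvLastOcc_append_single (l : List Int) (y x : Int) :
    pvLastOcc (l ++ [y]) x = if y = x then some l.length else pvLastOcc l x := by
  induction l with
  | nil => simp [pvLastOcc]
  | cons z t ih =>
    simp only [List.cons_append, pvLastOcc, ih, List.length_cons]
    by_cases hyx : y = x
    · simp [hyx]
    · simp [hyx]

theorem pvLastOcc_mem_drop (l : List Int) (x : Int) :
    ∀ m : Nat, (x ∈ l.drop m ↔ ∃ j, pvLastOcc l x = some j ∧ m ≤ j) := by
  induction l with
  | nil => intro m; simp [pvLastOcc]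
  | cons y t ih =>
    intro m
    cases m with
    | zero =>
      simp only [List.drop_zero, List.mem_cons, pvLastOcc]
      cases h : pvLastOcc t x with
      | some j =>
        constructor
        · intro _; exact ⟨j + 1, rfl, Nat.zero_le _⟩
        · intro _
          right
          have := (ih 0).mpr ⟨j, h, Nat.zero_le _⟩
          simpa using this
      | none =>
        by_cases hyx : y = x
        · simp [hyx]
        · constructor
          · intro hmem
            rcases hmem with h1 | h2
            · exact absurd h1.symm hyx
            · rcases (by simpa using (ih 0).mp h2 : ∃ j, pvLastOcc t x = some j ∧ True) with ⟨j, hj, _⟩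
              rw [h] at hj; cases hj
          · intro ⟨j, hj, _⟩
            simp [hyx] at hj
    | succ m' =>
      simp only [List.drop_succ_cons, pvLastOcc]
      rw [ih m']
      cases h : pvLastOcc t x with
      | some j =>
        constructor
        · rintro ⟨j', hj', hm⟩
          obtain rfl := Option.some.inj hj'
          exact ⟨j + 1, rfl, by omega⟩
        · rintro ⟨j', hj', hm⟩
          obtain rfl : j + 1 = j' := Option.some.inj hj'
          exact ⟨j, rfl, by omega⟩
      | none =>
        by_cases hyx : y = x <;> simp [hyx]

theorem pv_key (a : List Int) :
    ∀ (rest done : List Int) (s : Int) (d : PySem.Dict Int Int),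
      (∀ x, d.get? x = Option.map Int.ofNat (pvLastOcc done x)) →
      (rest.foldl pvStepA (s, done.drop (done.length - 5))).1
        = ((PySem.List.enumerate rest (done.length : Int)).foldl pvStepB (s, d)).1 := by
  intro rest
  induction rest with
  | nil => intro done s d _; simp
  | cons x rs ih =>
    intro done s d hd
    set n := done.length with hn
    rw [PySem.List.enumerate_cons, List.foldl_cons, List.foldl_cons]
    have hiff2 : ∀ j : Nat, (((n : Int) - Int.ofNat j ≤ 5) ↔ n - 5 ≤ j) := by
      intro j; rw [Int.ofNat_eq_natCast]; omega
    -- the two step scores agree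
    have hscore :
        (if x ∈ done.drop (n - 5) then s + 1 else s)
          = (match d.get? x with
             | some j => if (n : Int) - j ≤ 5 then s + 1 else s
             | none => s) := by
      rw [hd x]
      cases h : pvLastOcc done x with
      | some j =>
        have hiff : x ∈ done.drop (n - 5) ↔ n - 5 ≤ j := by
          rw [pvLastOcc_mem_drop]
          constructor
          · rintro ⟨j', hj', hle⟩; rw [h] at hj'; cases hj'; exact hle
          · intro hle; exact ⟨j, h, hle⟩
        simp only [Option.map_some]
        by_cases hc : n - 5 ≤ j
        · rw [if_pos (hiff.mpr hc), if_pos ((hiff2 j).mpr hc)]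
        · rw [if_neg (fun hm => hc (hiff.mp hm)), if_neg (fun hm => hc ((hiff2 j).mp hm))]
      | none =>
        simp only [Option.map_none]
        rw [if_neg]
        intro hmem
        rcases (pvLastOcc_mem_drop done x (n - 5)).mp hmem with ⟨j, hj, _⟩
        rw [h] at hj; cases hj
    -- the new buffer equals the invariant for done ++ [x]
    have hbuf' :
        (if (done.drop (n - 5)).length = 5 then (done.drop (n - 5)).drop 1
         else done.drop (n - 5)) ++ [x]
        = (done ++ [x]).drop ((n + 1) - 5) := by
      have hlen : (done.drop (n - 5)).length = n - (n - 5) := by simp [hn]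
      by_cases h5 : 5 ≤ n
      · rw [if_pos (by omega)]
        have hdd : (done.drop (n - 5)).drop 1 = done.drop ((n + 1) - 5) := by
          rw [List.drop_drop]; congr 1; omega
        rw [hdd, List.drop_append_of_le_length (by omega)]
      · rw [if_neg (by omega)]
        have h1 : n - 5 = 0 := by omega
        have h2 : (n + 1) - 5 = 0 := by omega
        rw [h1, h2]; simp
    -- the updated dict satisfies the last-occurrence invariant for done ++ [x]
    have hinv : ∀ x', (d.insert x (n : Int)).get? x'
        = Option.map Int.ofNat (pvLastOcc (done ++ [x]) x') := by
      intro x'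
      rw [pvLastOcc_append_single]
      by_cases hx : x' = x
      · subst hx
        rw [PySem.Dict.get?_insert_self, if_pos rfl]
        rfl
      · rw [PySem.Dict.get?_insert_of_ne d _ hx, hd x', if_neg (fun h => hx h.symm)]
    have hstepA : pvStepA (s, done.drop (n - 5)) x
        = ((if x ∈ done.drop (n - 5) then s + 1 else s),
           (done ++ [x]).drop ((n + 1) - 5)) := by
      simp only [pvStepA, ← hbuf']
    have hstepB : pvStepB (s, d) ((n : Int), x)
        = ((match d.get? x with
            | some j => if (n : Int) - j ≤ 5 then s + 1 else s
            | none => s), d.insert x (n : Int)) := rfl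
    rw [hstepA, hstepB, ← hscore]
    have := ih (done ++ [x]) (if x ∈ done.drop (n - 5) then s + 1 else s)
              (d.insert x (n : Int)) hinv
    simp only [List.length_append, List.length_cons, List.length_nil, ← hn] at this
    rw [show ((n : Int) + 1) = ((n + 1 : Nat) : Int) by push_cast; ring]
    simpa using this

-- ===== VERDICT (by name: the statement is the Claim_ definition above) =====
theorem get_memory_score_spec : Claim_equal_get_memory_score := by
  intro a _
  unfold Spec_get_memory_score get_memory_score get_memory_score_alt
  have := pv_key a a [] 0 PySem.Dict.empty (by intro x; simp [pvLastOcc, PySem.Dict.empty, PySem.Dict.get?])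
  simpa using this
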